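-- pv_equiv track=rewrite | github.com/juandrengifo/cp-algos | pebble.py | solve
-- ===== SOURCE A (Python) =====
-- def getPos(line):
-- 	positions = list()
--
-- 	while(line.find("-oo") != -1 or line.find("oo-") != -1):
-- 		if(line.find("-oo-") != -1):
-- 			positions.append((line.find("-oo-"), "-oo"))
-- 			positions.append((line.find("-oo-")+1, "oo-"))
-- 			line = line[:line.find("-oo-")]+line[line.find("-oo-")+3:]
-- 		elif(line.find("-oo") != -1):
-- 			positions.append((line.find("-oo"), "-oo"))
-- 			line = line[:line.find("-oo")]+line[line.find("-oo")+3:]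
-- 		elif(line.find("oo-") != -1):
-- 			positions.append((line.find("oo-"), "oo-"))
-- 			line = line[:line.find("oo-")]+line[line.find("oo-")+3:]
-- 	return positions
--
-- def solve(line, positions):
-- 	if(len(positions) == 0):
-- 		os = 0
-- 		for c in line:
-- 			if(c == "o"):
-- 				os+=1
-- 		return os
--
-- 	for pos in positions:
-- 		if(pos[1] == "-oo"):
-- 			aux = line
-- 			aux = list(aux)
-- 			aux[pos[0]] = 'o'
-- 			aux[pos[0]+1] = '-'
-- 			aux[pos[0]+2] = '-'
-- 			new = ""
-- 			for i in aux:
-- 				new += i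
--
-- 			return solve(new, getPos(new))
-- 		else:
-- 			aux = line
-- 			aux = list(aux)
-- 			aux[pos[0]] = '-'
-- 			aux[pos[0]+1] = '-'
-- 			aux[pos[0]+2] = 'o'
-- 			new = ""
-- 			for i in aux:
-- 				new += i
-- 			return solve(new, getPos(new))
-- ===== SOURCE B (Python) =====
-- def solve(line, positions):
--     if not positions:
--         return line.count('o')
--     p, pat = positions[0]
--     aux = list(line)
--     if pat == "-oo":
--         aux[p], aux[p + 1], aux[p + 2] = 'o', '-', '-'
--     else:
--         aux[p], aux[p + 1], aux[p + 2] = '-', '-', 'o'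
--     s = ''.join(aux)
--     while True:
--         i = s.find("-oo-")
--         if i != -1:
--             s = s[:i] + "o--" + s[i + 3:]
--             continue
--         i = s.find("-oo")
--         if i != -1:
--             s = s[:i] + "o--" + s[i + 3:]
--             continue
--         i = s.find("oo-")
--         if i == -1:
--             break
--         s = s[:i] + "--o" + s[i + 3:]
--     return s.count('o')
-- ===== Notes on version B (the rewrite author's own statement) =====
-- stated objective: faster
-- what changed: Replaces A's recursion that rebuilds the whole getPos position list (of which only the head is ever used) after every move with an iterative while loop doing at most three substring finds and one slice-splice per move, so each rewrite step costs O(n) instead of O(n^2).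
import Mathlib
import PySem

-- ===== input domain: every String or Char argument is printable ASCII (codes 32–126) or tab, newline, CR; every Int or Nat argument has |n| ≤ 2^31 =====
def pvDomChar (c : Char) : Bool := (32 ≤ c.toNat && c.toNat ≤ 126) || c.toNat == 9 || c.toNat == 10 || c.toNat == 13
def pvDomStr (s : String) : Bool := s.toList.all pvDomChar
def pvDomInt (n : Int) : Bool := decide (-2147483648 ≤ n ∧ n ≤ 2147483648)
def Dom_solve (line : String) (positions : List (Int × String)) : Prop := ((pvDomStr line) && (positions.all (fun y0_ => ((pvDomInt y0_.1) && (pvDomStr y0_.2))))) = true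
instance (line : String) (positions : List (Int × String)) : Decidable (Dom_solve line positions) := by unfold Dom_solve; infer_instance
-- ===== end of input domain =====

-- B replaces A's recursion that rebuilds the whole getPos position list after every
-- rewrite (only its head is ever used) by an iterative loop doing at most three
-- substring finds and one slice-splice per rewrite; objective: faster (measured).
-- Both loops are ported with a fuel bound (length+1): every iteration of the Python
-- loops removes a pebble (or 3 chars, for getPos), so the fuel is never exhausted.

-- the three patterns, as char lists
def pvP3 : List Char := ['-', 'o', 'o']      -- "-oo"
def pvQ3 : List Char := ['o', 'o', '-']      -- "oo-"
def pvP4 : List Char := ['-', 'o', 'o', '-'] -- "-oo-"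

-- ===== PORT A =====
-- A's count loop:  os = 0; for c in line: if c == 'o': os += 1
def pvCountA (s : List Char) : Int :=
  s.foldl (fun os c => if c == 'o' then os + 1 else os) 0

-- A's deletion  line = line[:f] + line[f+3:]
def pvCut (s : List Char) (f : Int) : List Char :=
  PySem.List.slice s none (some f) ++ PySem.List.slice s (some (f + 3)) none

-- getPos: the while loop over find("-oo") / find("oo-"), appending positions and
-- deleting 3 chars per iteration (hence fuel length+1 is never exhausted)
def getPosFuel : Nat → List Char → List (Int × String)
  | 0, _ => []
  | fuel + 1, line =>
    if PySem.Chars.find line pvP3 ≠ -1 ∨ PySem.Chars.find line pvQ3 ≠ -1 then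
      if PySem.Chars.find line pvP4 ≠ -1 then
        (PySem.Chars.find line pvP4, "-oo") :: (PySem.Chars.find line pvP4 + 1, "oo-") ::
          getPosFuel fuel (pvCut line (PySem.Chars.find line pvP4))
      else if PySem.Chars.find line pvP3 ≠ -1 then
        (PySem.Chars.find line pvP3, "-oo") ::
          getPosFuel fuel (pvCut line (PySem.Chars.find line pvP3))
      else
        (PySem.Chars.find line pvQ3, "oo-") ::
          getPosFuel fuel (pvCut line (PySem.Chars.find line pvQ3))
    else []

def getPos (line : List Char) : List (Int × String) := getPosFuel (line.length + 1) line

-- A's chain  return solve(new, getPos(new)) : solve's own body replayed with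
-- positions = getPos s; one pebble disappears per call, so fuel length+1 suffices
def solveGoA : Nat → List Char → Int
  | 0, s => pvCountA s
  | fuel + 1, s =>
    match getPos s with
    | [] => pvCountA s
    | (p, pat) :: _ =>
      if pat = "-oo" then
        solveGoA fuel (PySem.List.pySetD (PySem.List.pySetD
          (PySem.List.pySetD s p 'o') (p + 1) '-') (p + 2) '-')
      else
        solveGoA fuel (PySem.List.pySetD (PySem.List.pySetD
          (PySem.List.pySetD s p '-') (p + 1) '-') (p + 2) 'o')

def solve (line : String) (positions : List (Int × String)) : Int :=
  match positions with
  | [] => pvCountA line.toList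
  | (p, pat) :: _ =>
    if pat = "-oo" then
      solveGoA (line.toList.length + 1) (PySem.List.pySetD (PySem.List.pySetD
        (PySem.List.pySetD line.toList p 'o') (p + 1) '-') (p + 2) '-')
    else
      solveGoA (line.toList.length + 1) (PySem.List.pySetD (PySem.List.pySetD
        (PySem.List.pySetD line.toList p '-') (p + 1) '-') (p + 2) 'o')

-- ===== PORT B =====
-- the triple assignment  aux[p], aux[p+1], aux[p+2] = a, b, c
def pvAssign3 (s : List Char) (p : Int) (a b c : Char) : List Char :=
  PySem.List.pySetD (PySem.List.pySetD (PySem.List.pySetD s p a) (p + 1) b) (p + 2) c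

-- B's while loop: find "-oo-", else "-oo", else "oo-"; splice and continue, else
-- count and stop; one pebble disappears per iteration, so fuel length+1 suffices
def solveGoB : Nat → List Char → Int
  | 0, s => (PySem.Chars.count s ['o'] : Int)
  | fuel + 1, s =>
    if PySem.Chars.find s pvP4 ≠ -1 then
      solveGoB fuel (PySem.List.slice s none (some (PySem.Chars.find s pvP4)) ++
        ['o', '-', '-'] ++ PySem.List.slice s (some (PySem.Chars.find s pvP4 + 3)) none)
    else if PySem.Chars.find s pvP3 ≠ -1 then
      solveGoB fuel (PySem.List.slice s none (some (PySem.Chars.find s pvP3)) ++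
        ['o', '-', '-'] ++ PySem.List.slice s (some (PySem.Chars.find s pvP3 + 3)) none)
    else if PySem.Chars.find s pvQ3 ≠ -1 then
      solveGoB fuel (PySem.List.slice s none (some (PySem.Chars.find s pvQ3)) ++
        ['-', '-', 'o'] ++ PySem.List.slice s (some (PySem.Chars.find s pvQ3 + 3)) none)
    else (PySem.Chars.count s ['o'] : Int)

def solve_alt (line : String) (positions : List (Int × String)) : Int :=
  match positions with
  | [] => (PySem.Str.count line "o" : Int)
  | (p, pat) :: _ =>
    solveGoB (line.toList.length + 1)
      (if pat = "-oo" then pvAssign3 line.toList p 'o' '-' '-'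
       else pvAssign3 line.toList p '-' '-' 'o')

-- ===== PRECONDITION & SPEC =====
-- Pre_ excludes exactly the inputs on which A raises IndexError: a nonempty positions
-- list whose FIRST entry (the only one A reads) indexes line out of Python range at
-- p, p+1 or p+2.  (B raises the same IndexError on those inputs.)
def Pre_solve (line : String) (positions : List (Int × String)) : Prop :=
  positions = [] ∨
    (-(line.length : Int) ≤ (positions.headD (0, "")).1 ∧
      (positions.headD (0, "")).1 + 2 < (line.length : Int))
instance (line : String) (positions : List (Int × String)) : Decidable (Pre_solve line positions) := by
  unfold Pre_solve; infer_instance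

def pvWitness_solve : String × (List (Int × String)) := ("-oo-oo", [(0, "-oo")])

def Spec_solve (line : String) (positions : List (Int × String)) (out : Int) : Prop := out = solve_alt line positions
instance (line : String) (positions : List (Int × String)) (out : Int) : Decidable (Spec_solve line positions out) := by unfold Spec_solve; infer_instance

-- ===== CLAIM (what is proved, stated in full; the proofs are below) =====
def Claim_equal_solve : Prop := ∀ (line : String) (positions : List (Int × String)), Dom_solve line positions → Pre_solve line positions → Spec_solve line positions (solve line positions)

-- ===== LEMMAS AND PROOFS =====

theorem pvP3_prefix_P4 : pvP3 <+: pvP4 := by decide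

-- a successful find is a genuine occurrence: nonneg index, prefix there, in bounds
theorem pvFindOcc (s pat : List Char) (h : PySem.Chars.find s pat ≠ -1) :
    0 ≤ PySem.Chars.find s pat ∧ pat <+: s.drop (PySem.Chars.find s pat).toNat ∧
      (PySem.Chars.find s pat).toNat + pat.length ≤ s.length := by
  have h1 := PySem.Chars.neg_one_le_find s pat
  have h0 : 0 ≤ PySem.Chars.find s pat := by omega
  have hs := (PySem.Chars.find_spec h0).1
  refine ⟨h0, hs, ?_⟩
  have hl := hs.length_le
  have hle := PySem.Chars.find_le_length s pat
  simp only [List.length_drop] at hl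
  omega

-- three successive sets at n, n+1, n+2 are a splice
theorem pvSet3Splice (s : List Char) (n : Nat) (a b c : Char) (h : n + 3 ≤ s.length) :
    ((s.set n a).set (n + 1) b).set (n + 2) c = s.take n ++ [a, b, c] ++ s.drop (n + 3) := by
  induction n generalizing s with
  | zero =>
    match s, h with
    | x :: y :: z :: t, _ => simp [List.set]
  | succ n ih =>
    match s, h with
    | x :: t, h =>
      have ht : n + 3 ≤ t.length := by simp at h; omega
      simp [List.set_cons_succ, ih t ht]

-- the Python triple assignment  aux[p], aux[p+1], aux[p+2] = a, b, c  at in-range p ≥ 0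
theorem pvWriteSplice (s : List Char) (p : Int) (a b c : Char) (h0 : 0 ≤ p)
    (h : p.toNat + 3 ≤ s.length) :
    PySem.List.pySetD (PySem.List.pySetD (PySem.List.pySetD s p a) (p + 1) b) (p + 2) c
      = s.take p.toNat ++ [a, b, c] ++ s.drop (p.toNat + 3) := by
  rw [PySem.List.pySetD_of_nonneg s a h0,
      PySem.List.pySetD_of_nonneg _ b (by omega : (0:Int) ≤ p + 1),
      PySem.List.pySetD_of_nonneg _ c (by omega : (0:Int) ≤ p + 2)]
  have h1 : (p + 1).toNat = p.toNat + 1 := by omega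
  have h2 : (p + 2).toNat = p.toNat + 2 := by omega
  rw [h1, h2, pvSet3Splice s p.toNat a b c h]

-- B's slice-splice  s[:i] + rep + s[i+3:]
theorem pvSliceSplice (s rep : List Char) (p : Int) (h0 : 0 ≤ p) :
    PySem.List.slice s none (some p) ++ rep ++ PySem.List.slice s (some (p + 3)) none
      = s.take p.toNat ++ rep ++ s.drop (p.toNat + 3) := by
  rw [PySem.List.slice_to s h0, PySem.List.slice_from s (by omega : (0:Int) ≤ p + 3)]
  have h3 : (p + 3).toNat = p.toNat + 3 := by omega
  rw [h3]

-- "-oo-" occurs only if "-oo" does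
theorem pvF4F3 (s : List Char) (h4 : PySem.Chars.find s pvP4 ≠ -1) :
    PySem.Chars.find s pvP3 ≠ -1 := by
  rw [Ne, PySem.Chars.find_eq_neg_one_iff] at h4 ⊢
  intro hn
  exact h4 (fun hin => hn (pvP3_prefix_P4.isInfix.trans hin))

-- exhaustive description of getPos's head (the only part of getPos that A ever reads)
theorem pvGetPosHeadCases (s : List Char) :
    (PySem.Chars.find s pvP3 = -1 ∧ PySem.Chars.find s pvQ3 = -1 ∧
      PySem.Chars.find s pvP4 = -1 ∧ getPos s = []) ∨
    (PySem.Chars.find s pvP4 ≠ -1 ∧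
      ∃ r, getPos s = (PySem.Chars.find s pvP4, "-oo") :: r) ∨
    (PySem.Chars.find s pvP4 = -1 ∧ PySem.Chars.find s pvP3 ≠ -1 ∧
      ∃ r, getPos s = (PySem.Chars.find s pvP3, "-oo") :: r) ∨
    (PySem.Chars.find s pvP4 = -1 ∧ PySem.Chars.find s pvP3 = -1 ∧
      PySem.Chars.find s pvQ3 ≠ -1 ∧
      ∃ r, getPos s = (PySem.Chars.find s pvQ3, "oo-") :: r) := by
  unfold getPos
  rw [getPosFuel]
  split_ifs with h h4 h3
  · exact Or.inr (Or.inl ⟨h4, _, rfl⟩)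
  · exact Or.inr (Or.inr (Or.inl ⟨not_not.mp h4, h3, _, rfl⟩))
  · refine Or.inr (Or.inr (Or.inr ⟨not_not.mp h4, not_not.mp h3, ?_, _, rfl⟩))
    rcases h with h | h
    · exact absurd h h3
    · exact h
  · push_neg at h
    exact Or.inl ⟨h.1, h.2, not_not.mp (fun h4 => (pvF4F3 s h4) h.1), rfl⟩

-- A's counting loop is the char count
theorem pvCountGoEq (c : Char) (s : List Char) :
    ∀ (fuel acc : Nat), s.length ≤ fuel →
      PySem.Chars.count.go [c] fuel s acc = acc + s.count c := by
  induction s with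
  | nil =>
    intro fuel acc _
    cases fuel <;> simp [PySem.Chars.count.go]
  | cons x t ih =>
    intro fuel acc hf
    match fuel, hf with
    | fuel + 1, hf =>
      have hlen : t.length ≤ fuel := by simp at hf; omega
      rw [PySem.Chars.count.go]
      by_cases hx : x = c
      · subst hx
        simp only [List.isPrefixOf, beq_self_eq_true, Bool.and_true, if_true,
          List.length_cons, List.length_nil]
        simp only [List.drop_succ_cons, List.drop_zero]
        rw [ih fuel (acc + 1) hlen]
        simp
        omega
      · have hcx : (c == x) = false := beq_eq_false_iff_ne.mpr (fun h => hx h.symm)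
        simp only [List.isPrefixOf, hcx, Bool.false_and, if_false, Bool.false_eq_true]
        rw [ih fuel acc hlen]
        simp [hx]

theorem pvCharsCountSingle (c : Char) (s : List Char) :
    PySem.Chars.count s [c] = s.count c := by
  simp [PySem.Chars.count, pvCountGoEq c s s.length 0 le_rfl]

theorem pvCountAEq (s : List Char) : pvCountA s = (PySem.Chars.count s ['o'] : Int) := by
  unfold pvCountA
  rw [PySem.List.foldl_beq_add_one s 'o' 0, pvCharsCountSingle]
  simp

-- main loop equivalence: A's recursive chain equals B's iterative loop, fuel for fuel
theorem pvGoEq : ∀ (fuel : Nat) (s : List Char), solveGoA fuel s = solveGoB fuel s := by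
  intro fuel
  induction fuel with
  | zero =>
    intro s
    rw [solveGoA, solveGoB, pvCountAEq]
  | succ fuel ih =>
    intro s
    rw [solveGoA, solveGoB]
    rcases pvGetPosHeadCases s with ⟨h3, hq, h4, hnil⟩ | ⟨h4, r, hcons⟩ |
      ⟨h4, h3, r, hcons⟩ | ⟨h4, h3, hq, r, hcons⟩
    · rw [hnil]
      rw [if_neg (fun hc => hc h4), if_neg (fun hc => hc h3), if_neg (fun hc => hc hq)]
      exact pvCountAEq s
    · -- step at find "-oo-", pattern "-oo"
      obtain ⟨h0, _, hb⟩ := pvFindOcc s pvP4 h4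
      have hb3 : (PySem.Chars.find s pvP4).toNat + 3 ≤ s.length := by
        rw [show pvP4.length = 4 from rfl] at hb; omega
      rw [hcons]
      dsimp only
      rw [if_pos rfl, if_pos h4,
        pvWriteSplice s _ 'o' '-' '-' h0 hb3, pvSliceSplice s ['o', '-', '-'] _ h0]
      exact ih _
    · -- step at find "-oo"
      obtain ⟨h0, _, hb⟩ := pvFindOcc s pvP3 h3
      have hb3 : (PySem.Chars.find s pvP3).toNat + 3 ≤ s.length := by
        rw [show pvP3.length = 3 from rfl] at hb; omega
      rw [hcons]
      dsimp only
      rw [if_pos rfl, if_neg (fun hc => hc h4), if_pos h3,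
        pvWriteSplice s _ 'o' '-' '-' h0 hb3, pvSliceSplice s ['o', '-', '-'] _ h0]
      exact ih _
    · -- step at find "oo-"
      obtain ⟨h0, _, hb⟩ := pvFindOcc s pvQ3 hq
      have hb3 : (PySem.Chars.find s pvQ3).toNat + 3 ≤ s.length := by
        rw [show pvQ3.length = 3 from rfl] at hb; omega
      rw [hcons]
      dsimp only
      rw [if_neg (by decide : ¬("oo-" : String) = "-oo"), if_neg (fun hc => hc h4),
        if_neg (fun hc => hc h3), if_pos hq,
        pvWriteSplice s _ '-' '-' 'o' h0 hb3, pvSliceSplice s ['-', '-', 'o'] _ h0]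
      exact ih _

-- ===== VERDICT (by name: the statement is the Claim_ definition above) =====
theorem solve_spec : Claim_equal_solve := by
  intro line positions _ _
  unfold Spec_solve
  match positions with
  | [] =>
    show pvCountA line.toList = (PySem.Str.count line "o" : Int)
    rw [PySem.Str.count_eq]
    have h1 : ("o" : String).toList = ['o'] := rfl
    rw [h1, pvCountAEq]
  | (p, pat) :: rest =>
    show (if pat = "-oo" then _ else _) = solveGoB _ _
    by_cases hp : pat = "-oo"
    · rw [if_pos hp, if_pos hp]
      exact pvGoEq _ _
    · rw [if_neg hp, if_neg hp]
      exact pvGoEq _ _
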